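-- pv_equiv track=rewrite | github.com/SangamNirala/aptitude | backend/scraping/utils/content_validator.py | _auto_detect_content_types
-- ===== SOURCE A (Python) =====
-- from typing import Dict, List, Optional, Any, Tuple, Union
-- from enum import Enum
--
-- class ContentType(str, Enum):
--     QUESTION_TEXT = "question_text"
--     MULTIPLE_CHOICE = "multiple_choice"
--     EXPLANATION = "explanation"
--     CATEGORY = "category"
--     DIFFICULTY = "difficulty"
--     URL = "url"
--     HTML_CONTENT = "html_content"
--
-- def _auto_detect_content_types(content_data: Dict[str, Any]) -> Dict[str, ContentType]:
--     """Auto-detect content types based on field names"""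
--     content_types = {}
--
--     for field_name, content in content_data.items():
--         field_lower = field_name.lower()
--
--         if any(keyword in field_lower for keyword in ['question', 'text', 'problem']):
--             content_types[field_name] = ContentType.QUESTION_TEXT
--         elif any(keyword in field_lower for keyword in ['option', 'choice', 'answer']):
--             content_types[field_name] = ContentType.MULTIPLE_CHOICE
--         elif any(keyword in field_lower for keyword in ['explanation', 'solution', 'hint']):
--             content_types[field_name] = ContentType.EXPLANATION
--         elif any(keyword in field_lower for keyword in ['category', 'topic', 'subject']):
--             content_types[field_name] = ContentType.CATEGORY
--         elif any(keyword in field_lower for keyword in ['difficulty', 'level']):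
--             content_types[field_name] = ContentType.DIFFICULTY
--         elif any(keyword in field_lower for keyword in ['url', 'link', 'href']):
--             content_types[field_name] = ContentType.URL
--         elif 'html' in field_lower:
--             content_types[field_name] = ContentType.HTML_CONTENT
--         else:
--             # Default to question text for unknown fields
--             content_types[field_name] = ContentType.QUESTION_TEXT
--
--     return content_types
-- ===== SOURCE B (Python) =====
-- # Paint-over algorithm: every field starts as the default type, then the rule
-- # passes run from LOWEST to HIGHEST precedence over all fields, each pass
-- # overwriting the entries its keywords match; the last (highest-precedence)
-- # matching pass wins, which equals A's first-match ladder.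
-- RULES = [
--     ("question_text", ["question", "text", "problem"]),
--     ("multiple_choice", ["option", "choice", "answer"]),
--     ("explanation", ["explanation", "solution", "hint"]),
--     ("category", ["category", "topic", "subject"]),
--     ("difficulty", ["difficulty", "level"]),
--     ("url", ["url", "link", "href"]),
--     ("html_content", ["html"]),
-- ]
--
-- def _auto_detect_content_types(content_data):
--     result = {name: "question_text" for name in content_data}
--     for ctype, keywords in reversed(RULES):
--         for name in content_data:
--             low = name.lower()
--             if any(k in low for k in keywords):
--                 result[name] = ctype
--     return result
-- ===== Notes on version B (the rewrite author's own statement) =====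
-- stated objective: alternative
-- what changed: B inverts the loop structure: instead of A's per-field first-match elif ladder, it initializes every field to the default type and then runs overwrite passes over all fields, one per rule, from lowest to highest precedence, so the last matching pass (highest precedence) wins.
import Mathlib
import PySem

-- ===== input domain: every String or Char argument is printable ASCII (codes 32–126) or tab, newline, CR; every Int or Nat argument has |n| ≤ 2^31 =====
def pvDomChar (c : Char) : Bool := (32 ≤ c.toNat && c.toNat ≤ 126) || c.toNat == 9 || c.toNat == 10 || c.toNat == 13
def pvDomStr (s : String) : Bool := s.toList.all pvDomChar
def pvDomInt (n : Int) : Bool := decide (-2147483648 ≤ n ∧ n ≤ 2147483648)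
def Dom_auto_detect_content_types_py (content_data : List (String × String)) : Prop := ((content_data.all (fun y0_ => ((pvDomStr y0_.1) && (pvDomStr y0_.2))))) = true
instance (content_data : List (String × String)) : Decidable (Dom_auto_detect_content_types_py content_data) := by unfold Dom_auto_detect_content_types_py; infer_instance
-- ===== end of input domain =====

-- B replaces A's per-field first-match elif ladder by a paint-over scheme: every field starts at the
-- default type and overwrite passes run from lowest to highest precedence (alternative decomposition, same cost).

-- ===== PORT A =====
def auto_detect_content_types_py (content_data : List (String × String)) : List (String × String) :=
  (content_data.foldl (fun (d : PySem.Dict String String) p =>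
    let fl := PySem.Str.lower p.1
    let v :=
      if ["question", "text", "problem"].any (fun k => PySem.Str.isIn k fl) then "question_text"
      else if ["option", "choice", "answer"].any (fun k => PySem.Str.isIn k fl) then "multiple_choice"
      else if ["explanation", "solution", "hint"].any (fun k => PySem.Str.isIn k fl) then "explanation"
      else if ["category", "topic", "subject"].any (fun k => PySem.Str.isIn k fl) then "category"
      else if ["difficulty", "level"].any (fun k => PySem.Str.isIn k fl) then "difficulty"
      else if ["url", "link", "href"].any (fun k => PySem.Str.isIn k fl) then "url"
      else if PySem.Str.isIn "html" fl then "html_content"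
      else "question_text"
    d.insert p.1 v) PySem.Dict.empty).items

-- ===== PORT B =====
def pvRules : List (String × List String) := [("question_text", ["question", "text", "problem"]), ("multiple_choice", ["option", "choice", "answer"]), ("explanation", ["explanation", "solution", "hint"]), ("category", ["category", "topic", "subject"]), ("difficulty", ["difficulty", "level"]), ("url", ["url", "link", "href"]), ("html_content", ["html"])]

def auto_detect_content_types_py_alt (content_data : List (String × String)) : List (String × String) :=
  let result := content_data.foldl (fun (d : PySem.Dict String String) p => d.insert p.1 "question_text") PySem.Dict.empty
  (pvRules.reverse.foldl (fun d r =>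
     content_data.foldl (fun d p =>
       let low := PySem.Str.lower p.1
       if r.2.any (fun k => PySem.Str.isIn k low) then d.insert p.1 r.1 else d) d) result).items

-- ===== PRECONDITION & SPEC =====
def Spec_auto_detect_content_types_py (content_data : List (String × String)) (out : List (String × String)) : Prop := out = auto_detect_content_types_py_alt content_data
instance (content_data : List (String × String)) (out : List (String × String)) : Decidable (Spec_auto_detect_content_types_py content_data out) := by unfold Spec_auto_detect_content_types_py; infer_instance

-- ===== CLAIM (what is proved, stated in full; the proofs are below) =====
def Claim_equal_auto_detect_content_types_py : Prop := ∀ (content_data : List (String × String)), Dom_auto_detect_content_types_py content_data → Spec_auto_detect_content_types_py content_data (auto_detect_content_types_py content_data)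

-- ===== LEMMAS AND PROOFS =====

-- the ladder of A, as a function of the field name (proof helper)
def pvLadder (name : String) : String :=
  let fl := PySem.Str.lower name
  if ["question", "text", "problem"].any (fun k => PySem.Str.isIn k fl) then "question_text"
  else if ["option", "choice", "answer"].any (fun k => PySem.Str.isIn k fl) then "multiple_choice"
  else if ["explanation", "solution", "hint"].any (fun k => PySem.Str.isIn k fl) then "explanation"
  else if ["category", "topic", "subject"].any (fun k => PySem.Str.isIn k fl) then "category"
  else if ["difficulty", "level"].any (fun k => PySem.Str.isIn k fl) then "difficulty"
  else if ["url", "link", "href"].any (fun k => PySem.Str.isIn k fl) then "url"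
  else if PySem.Str.isIn "html" fl then "html_content"
  else "question_text"

-- whether rule r matches field name
def pvM (r : String × List String) (name : String) : Bool :=
  r.2.any (fun k => PySem.Str.isIn k (PySem.Str.lower name))

-- one overwrite pass over the fields, on a dict containing all field keys
theorem pv_pass_items (l : List (String × String)) (m : String → Bool) (t : String) :
    ∀ (d : PySem.Dict String String), (∀ p ∈ l, d.contains p.1 = true) →
    (l.foldl (fun d p => if m p.1 then d.insert p.1 t else d) d).items
      = d.items.map (fun q => if (l.any (fun p => p.1 == q.1)) && m q.1 then (q.1, t) else q) := by
  induction l with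
  | nil => intro d _; simp
  | cons p0 ps ih =>
    intro d h
    simp only [List.foldl_cons]
    by_cases hm : m p0.1
    · rw [if_pos hm]
      rw [ih (d.insert p0.1 t) (by
        intro p hp
        rw [PySem.Dict.contains_insert]
        simp [h p (List.mem_cons_of_mem _ hp)])]
      rw [PySem.Dict.items_insert_of_contains d t (h p0 (by simp))]
      rw [List.map_map]
      apply List.map_congr_left
      intro q _
      simp only [Function.comp]
      by_cases hq : q.1 = p0.1
      · simp [hq, hm]
      · have hb : (p0.1 == q.1) = false := by
          simp only [beq_eq_false_iff_ne]; exact fun h' => hq h'.symm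
        have hb2 : (q.1 == p0.1) = false := by
          simp only [beq_eq_false_iff_ne]; exact hq
        have hred : (if (q.1 == p0.1) = true then (p0.1, t) else q) = q := by rw [hb2]; simp
        simp only [hred, List.any_cons, hb, Bool.false_or]
    · rw [if_neg hm]
      rw [ih d (fun p hp => h p (List.mem_cons_of_mem _ hp))]
      apply List.map_congr_left
      intro q _
      by_cases hq : q.1 = p0.1
      · have : ¬ m q.1 = true := by rw [hq]; exact hm
        simp [this]
      · have hb : (p0.1 == q.1) = false := by
          simp only [beq_eq_false_iff_ne]; exact fun h' => hq h'.symm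
        rw [List.any_cons, hb, Bool.false_or]

-- keys (hence contains) are unchanged by an overwrite pass
theorem pv_pass_contains (l : List (String × String)) (m : String → Bool) (t : String)
    (d : PySem.Dict String String) (h : ∀ p ∈ l, d.contains p.1 = true) (x : String) :
    (l.foldl (fun d p => if m p.1 then d.insert p.1 t else d) d).contains x = d.contains x := by
  rw [PySem.Dict.contains_eq_decide_mem_keys, PySem.Dict.contains_eq_decide_mem_keys]
  have : (l.foldl (fun d p => if m p.1 then d.insert p.1 t else d) d).keys = d.keys := by
    show ((l.foldl (fun d p => if m p.1 then d.insert p.1 t else d) d).items).map Prod.fst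
      = d.items.map Prod.fst
    rw [pv_pass_items l m t d h, List.map_map]
    apply List.map_congr_left
    intro q _
    by_cases hq : (l.any (fun p => p.1 == q.1)) && m q.1 <;> simp [Function.comp, hq]
  rw [this]

-- the staged passes, rules processed in the given order (last write wins)
theorem pv_multi_items (l : List (String × String)) :
    ∀ (rs : List (String × List String)) (d : PySem.Dict String String),
    (∀ p ∈ l, d.contains p.1 = true) →
    (rs.foldl (fun d r => l.foldl (fun d p => if pvM r p.1 then d.insert p.1 r.1 else d) d) d).items
      = d.items.map (fun q => if l.any (fun p => p.1 == q.1)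
          then (q.1, rs.foldl (fun v r => if pvM r q.1 then r.1 else v) q.2) else q) := by
  intro rs
  induction rs with
  | nil =>
    intro d _
    simp only [List.foldl_nil]
    conv_lhs => rw [← List.map_id d.items]
    apply List.map_congr_left
    intro q _
    by_cases hq : l.any (fun p => p.1 == q.1) <;> simp [hq]
  | cons r rs ih =>
    intro d h
    simp only [List.foldl_cons]
    rw [ih _ (fun p hp => by rw [pv_pass_contains l (pvM r) r.1 d h]; exact h p hp)]
    rw [pv_pass_items l (pvM r) r.1 d h, List.map_map]
    apply List.map_congr_left
    intro q _
    simp only [Function.comp]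
    by_cases hl : l.any (fun p => p.1 == q.1)
    · by_cases hm : pvM r q.1
      · simp [hl, hm]
      · simp [hl, hm]
    · simp [hl]

-- folding key-determined inserts for two value functions, tracked through a map
theorem pv_two_folds (f g : String → String) :
    ∀ (l : List (String × String)) (d d' : PySem.Dict String String),
    d.items = d'.items.map (fun q => (q.1, f q.1)) →
    (l.foldl (fun d p => d.insert p.1 (f p.1)) d).items
      = (l.foldl (fun d p => d.insert p.1 (g p.1)) d').items.map (fun q => (q.1, f q.1)) := by
  intro l
  induction l with
  | nil => intro d d' h; simpa using h
  | cons p ps ih =>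
    intro d d' h
    simp only [List.foldl_cons]
    apply ih
    have hkeys : d.keys = d'.keys := by
      show d.items.map Prod.fst = d'.items.map Prod.fst
      rw [h, List.map_map]; rfl
    have hc : d.contains p.1 = d'.contains p.1 := by
      rw [PySem.Dict.contains_eq_decide_mem_keys, PySem.Dict.contains_eq_decide_mem_keys, hkeys]
    by_cases hcc : d'.contains p.1 = true
    · rw [PySem.Dict.items_insert_of_contains d (f p.1) (by rw [hc]; exact hcc),
          PySem.Dict.items_insert_of_contains d' (g p.1) hcc, h, List.map_map, List.map_map]
      apply List.map_congr_left
      intro q _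
      simp only [Function.comp]
      by_cases hq : q.1 = p.1
      · simp [hq]
      · simp [beq_iff_eq, hq]
    · have hcc' : d.contains p.1 = false := by rw [hc]; simpa using hcc
      rw [PySem.Dict.items_insert_of_not_contains d (f p.1) hcc',
          PySem.Dict.items_insert_of_not_contains d' (g p.1) (by simpa using hcc),
          List.map_append, h]
      simp

-- every value in the initial dict is the default
theorem pv_init_values (v : String) :
    ∀ (l : List (String × String)) (d : PySem.Dict String String),
    (∀ q ∈ d.items, q.2 = v) →
    ∀ q ∈ (l.foldl (fun d p => d.insert p.1 v) d).items, q.2 = v := by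
  intro l
  induction l with
  | nil => intro d h; exact h
  | cons p ps ih =>
    intro d h
    apply ih
    intro q hq
    rcases (PySem.Dict.mem_items_insert d p.1 v q).mp hq with h1 | h2
    · rw [h1]
    · exact h q h2.1

-- the initial dict contains every field key
theorem pv_init_contains (l : List (String × String)) (p : String × String) (hp : p ∈ l) :
    (l.foldl (fun (d : PySem.Dict String String) p => d.insert p.1 "question_text") PySem.Dict.empty).contains p.1 = true := by
  rw [PySem.Dict.contains_iff_mem_keys, PySem.Dict.keys_foldl_insert_key]
  have hk : (PySem.Dict.empty : PySem.Dict String String).keys = ([] : List String) := rfl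
  rw [hk, PySem.Set.update_nil_left, PySem.Set.mem_ofList]
  exact List.mem_map.mpr ⟨p, hp, rfl⟩

-- the reversed-rule overwrite fold computes exactly A's ladder
theorem pv_reverse_fold_eq_ladder (k : String) :
    pvRules.reverse.foldl (fun v r => if pvM r k then r.1 else v) "question_text" = pvLadder k := by
  have h : pvRules.reverse = [("html_content", ["html"]), ("url", ["url", "link", "href"]), ("difficulty", ["difficulty", "level"]), ("category", ["category", "topic", "subject"]), ("explanation", ["explanation", "solution", "hint"]), ("multiple_choice", ["option", "choice", "answer"]), ("question_text", ["question", "text", "problem"])] := by rfl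
  rw [h]
  simp only [List.foldl_cons, List.foldl_nil, pvM, pvLadder]
  simp [List.any_cons, List.any_nil]

-- ===== VERDICT (by name: the statement is the Claim_ definition above) =====
theorem auto_detect_content_types_py_spec : Claim_equal_auto_detect_content_types_py := by
  intro content_data _
  show auto_detect_content_types_py content_data = auto_detect_content_types_py_alt content_data
  have hA : auto_detect_content_types_py content_data
      = (content_data.foldl (fun (d : PySem.Dict String String) p => d.insert p.1 (pvLadder p.1)) PySem.Dict.empty).items := rfl
  set d0 := content_data.foldl (fun (d : PySem.Dict String String) p => d.insert p.1 "question_text") PySem.Dict.empty with hd0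
  have hB : auto_detect_content_types_py_alt content_data
      = (pvRules.reverse.foldl (fun d r =>
          content_data.foldl (fun d p => if pvM r p.1 then d.insert p.1 r.1 else d) d) d0).items := rfl
  rw [hA, hB]
  rw [pv_two_folds pvLadder (fun _ => "question_text") content_data PySem.Dict.empty PySem.Dict.empty (by rfl)]
  rw [pv_multi_items content_data pvRules.reverse d0 (fun p hp => pv_init_contains content_data p hp)]
  apply Eq.symm
  apply List.map_congr_left
  intro q hq
  have hval : q.2 = "question_text" :=
    pv_init_values "question_text" content_data PySem.Dict.empty (by
      intro q' hq'
      have he : (PySem.Dict.empty : PySem.Dict String String).items = ([] : List (String × String)) := rfl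
      rw [he] at hq'
      cases hq') q hq
  have hkey : q.1 ∈ d0.keys := PySem.Dict.mem_keys_of_mem_items d0 hq
  have hany : content_data.any (fun p => p.1 == q.1) = true := by
    rw [hd0, PySem.Dict.keys_foldl_insert_key] at hkey
    rw [show (PySem.Dict.empty : PySem.Dict String String).keys = ([] : List String) from rfl,
        PySem.Set.update_nil_left, PySem.Set.mem_ofList] at hkey
    rcases List.mem_map.mp hkey with ⟨p, hp, hpq⟩
    exact List.any_eq_true.mpr ⟨p, hp, by simp [hpq]⟩
  rw [if_pos hany, hval, pv_reverse_fold_eq_ladder]
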